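-- pv_equiv track=rewrite | github.com/graphsignal/solver-demo | solutions/1007-A.py | maximize_positions
-- ===== SOURCE A (Python) =====
-- def maximize_positions(n, a):
--     # Step 2: Sort the array to get the ordered elements
--     sorted_a = sorted(a)
--
--     # Split the sorted array into two halves
--     left = sorted_a[:n//2]
--     right = sorted_a[n//2:]
--
--     # Initialize pointers for each half
--     i, j = 0, 0
--     max_count = 0
--
--     # Step 4 & 5: Use two pointers to count the maximal number of elements
--     while i < len(left) and j < len(right):
--         if right[j] > left[i]:
--             max_count += 1
--             i += 1
--         j += 1
--
--     return max_count
-- ===== SOURCE B (Python) =====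
-- def maximize_positions(n, a):
--     # index-aligned comparison instead of the two-pointer greedy loop
--     s = sorted(a)
--     left = s[:n//2]
--     right = s[n//2:]
--     m = min(len(left), len(right))
--     return sum(1 for x, y in zip(left, right[len(right)-m:]) if x < y)
-- ===== Notes on version B (the rewrite author's own statement) =====
-- stated objective: simpler
-- what changed: Replaces the greedy two-pointer matching loop over the two sorted halves by a single index-aligned comparison: each of the smaller half's elements is zipped against the correspondingly aligned element of the larger half's tail and strict increases are counted.
import Mathlib
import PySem

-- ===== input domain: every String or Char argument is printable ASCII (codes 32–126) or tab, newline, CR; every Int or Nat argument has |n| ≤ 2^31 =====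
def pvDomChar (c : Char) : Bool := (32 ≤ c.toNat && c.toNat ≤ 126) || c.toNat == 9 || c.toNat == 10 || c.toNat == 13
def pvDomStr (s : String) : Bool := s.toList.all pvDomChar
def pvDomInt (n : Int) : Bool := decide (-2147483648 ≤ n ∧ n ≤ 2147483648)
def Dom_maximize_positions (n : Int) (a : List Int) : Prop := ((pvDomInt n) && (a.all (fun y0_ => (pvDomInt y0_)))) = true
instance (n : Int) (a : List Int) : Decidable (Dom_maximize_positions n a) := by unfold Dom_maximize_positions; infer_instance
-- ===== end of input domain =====

-- B replaces A's greedy two-pointer matching over the two halves by a single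
-- index-aligned zip of the smaller half against the tail of the larger half (simpler).

-- ===== PORT A =====
-- the while loop of A: i/j pointers become the consumed-prefix recursion on the two lists,
-- cnt is the accumulator; 'right[j] > left[i]' is the head comparison y > x
def pvLoopA : List Int → List Int → Int → Int
  | x :: ls, y :: rs, cnt =>
      if y > x then pvLoopA ls rs (cnt + 1) else pvLoopA (x :: ls) rs cnt
  | _, _, cnt => cnt
termination_by l r _ => l.length + r.length

def maximize_positions (n : Int) (a : List Int) : Int :=
  let sorted_a := PySem.List.sorted a (fun x => x)
  let left := PySem.List.slice sorted_a none (some (PySem.Int.floordiv n 2))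
  let right := PySem.List.slice sorted_a (some (PySem.Int.floordiv n 2)) none
  pvLoopA left right 0

-- ===== PORT B =====
def maximize_positions_alt (n : Int) (a : List Int) : Int :=
  let s := PySem.List.sorted a (fun x => x)
  let left := PySem.List.slice s none (some (PySem.Int.floordiv n 2))
  let right := PySem.List.slice s (some (PySem.Int.floordiv n 2)) none
  let m := min left.length right.length
  -- sum(1 for x, y in zip(left, right[len(right)-m:]) if x < y)
  ((left.zip (PySem.List.slice right (some ((right.length : Int) - (m : Int))) none)).countP
      (fun p => decide (p.1 < p.2)) : Nat)

-- ===== PRECONDITION & SPEC =====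
def Spec_maximize_positions (n : Int) (a : List Int) (out : Int) : Prop := out = maximize_positions_alt n a
instance (n : Int) (a : List Int) (out : Int) : Decidable (Spec_maximize_positions n a out) := by unfold Spec_maximize_positions; infer_instance

-- ===== CLAIM (what is proved, stated in full; the proofs are below) =====
def Claim_equal_maximize_positions : Prop := ∀ (n : Int) (a : List Int), Dom_maximize_positions n a → Spec_maximize_positions n a (maximize_positions n a)

-- ===== LEMMAS AND PROOFS =====

lemma pvLoopA_nil_left (r : List Int) (c : Int) : pvLoopA [] r c = c := by
  cases r <;> simp [pvLoopA]

lemma pvLoopA_nil_right (l : List Int) (c : Int) : pvLoopA l [] c = c := by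
  cases l <;> simp [pvLoopA]

lemma pvLoopA_cons (x y : Int) (ls rs : List Int) (c : Int) :
    pvLoopA (x :: ls) (y :: rs) c =
      if y > x then pvLoopA ls rs (c + 1) else pvLoopA (x :: ls) rs c := by
  rw [pvLoopA]

-- zipping a constant-valued list against r does not depend on which constant list it is
lemma pvZipConst (x : Int) : ∀ (r l l' : List Int),
    (∀ z ∈ l, z = x) → (∀ z ∈ l', z = x) →
    r.length ≤ l.length → r.length ≤ l'.length → l.zip r = l'.zip r := by
  intro r
  induction r with
  | nil => intro l l' _ _ _ _; simp
  | cons w ws ih =>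
      intro l l' hl hl' hlen hlen'
      cases l with
      | nil => simp at hlen
      | cons a as =>
        cases l' with
        | nil => simp at hlen'
        | cons b bs =>
            have ha : a = x := hl a (by simp)
            have hb : b = x := hl' b (by simp)
            simp only [List.zip_cons_cons, ha, hb]
            rw [ih as bs (fun z hz => hl z (by simp [hz])) (fun z hz => hl' z (by simp [hz]))
              (by simpa using hlen) (by simpa using hlen')]

-- the greedy two-pointer matching over a sorted split equals the index-aligned count
lemma pvLoopA_eq : ∀ (right left : List Int) (c : Int),
    List.Pairwise (· ≤ ·) (left ++ right) →
    pvLoopA left right c =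
      c + ((left.zip (right.drop (right.length - min left.length right.length))).countP
            (fun p => decide (p.1 < p.2)) : Nat) := by
  intro right
  induction right with
  | nil => intro left c _; simp [pvLoopA_nil_right]
  | cons y rs ih =>
      intro left c h
      cases left with
      | nil => simp [pvLoopA_nil_left]
      | cons x ls =>
        have hx : ∀ z ∈ ls ++ y :: rs, x ≤ z := (List.pairwise_cons.mp h).1
        have htail : List.Pairwise (· ≤ ·) (ls ++ y :: rs) := (List.pairwise_cons.mp h).2
        have hyr : List.Pairwise (· ≤ ·) (y :: rs) :=
          List.Pairwise.sublist (List.sublist_append_right ls (y :: rs)) htail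
        have hy : ∀ z ∈ rs, y ≤ z := (List.pairwise_cons.mp hyr).1
        rw [pvLoopA_cons]
        by_cases hxy : y > x
        · rw [if_pos hxy]
          have h2 : List.Pairwise (· ≤ ·) (ls ++ rs) :=
            List.Pairwise.sublist
              (List.Sublist.append (List.sublist_cons_self x ls) (List.sublist_cons_self y rs)) h
          rw [ih ls (c + 1) h2]
          rcases Nat.lt_or_ge ls.length rs.length with hLR | hRL
          · -- strictly more right than left: x is paired with rs[rs.length - ls.length - 1]
            have hidx : rs.length - ls.length - 1 < rs.length := by omega
            have hdrop1 : (y :: rs).length - min (x :: ls).length (y :: rs).length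
                = (rs.length - ls.length - 1) + 1 := by simp only [List.length_cons]; omega
            rw [hdrop1, List.drop_succ_cons, List.drop_eq_getElem_cons hidx]
            have hmem : rs[rs.length - ls.length - 1] ∈ rs := List.getElem_mem hidx
            have hlt : x < rs[rs.length - ls.length - 1] := lt_of_lt_of_le hxy (hy _ hmem)
            have hdrop2 : rs.length - min ls.length rs.length = rs.length - ls.length := by omega
            have hsucc : (rs.length - ls.length - 1) + 1 = rs.length - ls.length := by omega
            rw [hdrop2, List.zip_cons_cons, List.countP_cons, hsucc]
            simp only [hlt, decide_true]
            push_cast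
            ring
          · -- right not longer: heads x, y are paired with each other
            have hdrop1 : (y :: rs).length - min (x :: ls).length (y :: rs).length = 0 := by
              simp only [List.length_cons]; omega
            have hdrop2 : rs.length - min ls.length rs.length = 0 := by omega
            rw [hdrop1, hdrop2, List.drop_zero, List.drop_zero, List.zip_cons_cons,
              List.countP_cons]
            simp only [hxy, decide_true]
            push_cast
            ring
        · rw [if_neg hxy]
          have hxley : x ≤ y := hx y (by simp)
          have hyx : y = x := le_antisymm (by omega) hxley
          have h2 : List.Pairwise (· ≤ ·) ((x :: ls) ++ rs) :=
            List.Pairwise.sublist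
              (List.Sublist.append (List.Sublist.refl (x :: ls)) (List.sublist_cons_self y rs)) h
          rw [ih (x :: ls) c h2]
          rcases Nat.lt_or_ge ls.length rs.length with hLR | hRL
          · -- same alignment on both sides: indices coincide
            have h1 : (y :: rs).length - min (x :: ls).length (y :: rs).length
                = (rs.length - ls.length - 1) + 1 := by simp only [List.length_cons]; omega
            have h2 : rs.length - min (x :: ls).length rs.length
                = rs.length - ls.length - 1 := by simp only [List.length_cons]; omega
            rw [h1, List.drop_succ_cons, h2]
          · -- right not longer and all of left equals x = y: dropping y shifts the zip by one
            -- equal-valued element, leaving the count unchanged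
            have hconst : ∀ z ∈ x :: ls, z = x := by
              intro z hz
              rcases List.mem_cons.mp hz with h1 | h1
              · exact h1
              · have hzy : z ≤ y := (List.pairwise_append.mp htail).2.2 z h1 y (by simp)
                have hxz : x ≤ z := hx z (List.mem_append_left _ h1)
                omega
            have hdrop1 : (y :: rs).length - min (x :: ls).length (y :: rs).length = 0 := by
              simp only [List.length_cons]; omega
            have hdrop2 : rs.length - min (x :: ls).length rs.length = 0 := by simp only [List.length_cons]; omega
            rw [hdrop1, hdrop2, List.drop_zero, List.drop_zero, List.zip_cons_cons,
              List.countP_cons]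
            have hzip : ls.zip rs = (x :: ls).zip rs :=
              pvZipConst x rs ls (x :: ls)
                (fun z hz => hconst z (by simp [hz])) hconst (by omega) (by simp only [List.length_cons]; omega)
            rw [hzip]
            simp [hyx]

-- the two Python slices of A reassemble the sorted list, for any int bound
lemma pvSliceSplit (xs : List Int) (b : Int) :
    PySem.List.slice xs none (some b) ++ PySem.List.slice xs (some b) none = xs := by
  simp [PySem.List.slice]
  have h : List.take (xs.length - PySem.List.clampIdx xs.length b)
      (List.drop (PySem.List.clampIdx xs.length b) xs)
      = List.drop (PySem.List.clampIdx xs.length b) xs :=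
    List.take_of_length_le (by simp)
  rw [h]
  exact List.take_append_drop _ _

-- ===== VERDICT (by name: the statement is the Claim_ definition above) =====
theorem maximize_positions_spec : Claim_equal_maximize_positions := by
  intro n a _
  unfold Spec_maximize_positions maximize_positions maximize_positions_alt
  simp only []
  set s := PySem.List.sorted a (fun x => x) with hs
  set left := PySem.List.slice s none (some (PySem.Int.floordiv n 2)) with hleft
  set right := PySem.List.slice s (some (PySem.Int.floordiv n 2)) none with hright
  have hsorted : List.Pairwise (· ≤ ·) (left ++ right) := by
    rw [hleft, hright, pvSliceSplit, hs]
    simpa using PySem.List.sorted_pairwise a (fun x => x)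
  have hmle : min left.length right.length ≤ right.length := Nat.min_le_right _ _
  have hslice : PySem.List.slice right
      (some ((right.length : Int) - ((min left.length right.length : Nat) : Int))) none
      = right.drop (right.length - min left.length right.length) := by
    rw [PySem.List.slice_from _ (by omega)]
    congr 1
    omega
  rw [pvLoopA_eq right left 0 hsorted, hslice]
  ring
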